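-- pv_equiv track=rewrite | github.com/MetthewB/NX-414-Team-16 | utils.py | list_to_classes
-- ===== SOURCE A (Python) =====
-- def list_to_classes(objects):
--     '''
--     Transform the input list of objects into one of 8 classes: animals, boats, cars, chairs, faces, fruits, planes, or tables.
--     Args:
--         objects (list of str): A list of object names, where each name corresponds to one of the 64 classes.
--     Returns:
--         transformed_objects (list of str): A list of object names, where each name corresponds to one of the 8 classes.
--     '''
--
--     fruits = ['apple', 'apricot', 'peach', 'pear', 'raspberry', 'strawberry', 'walnut', 'watermelon']
--     animals = ['bear', 'cow', 'dog', 'elephant', 'gorilla', 'hedgehog', 'lioness', 'turtle']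
--     objects = ['face' if 'face' in s else s for s in objects]
--     objects = ['car' if 'car' in s else s for s in objects]
--     objects = ['chair' if 'chair' in s else s for s in objects]
--     objects = ['airplane' if 'airplane' in s else s for s in objects]
--     objects = ['table' if 'table' in s else s for s in objects]
--     objects = ['fruit' if s in fruits else s for s in objects]
--     objects = ['animal' if s in animals else s for s in objects]
--     objects = ['ship' if 'ship' in s else s for s in objects]
--     return objects
-- ===== SOURCE B (Python) =====
-- FRUITS = frozenset(['apple', 'apricot', 'peach', 'pear', 'raspberry', 'strawberry', 'walnut', 'watermelon'])
-- ANIMALS = frozenset(['bear', 'cow', 'dog', 'elephant', 'gorilla', 'hedgehog', 'lioness', 'turtle'])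
--
-- def _classify(s):
--     if 'face' in s:
--         s = 'face'
--     if 'car' in s:
--         s = 'car'
--     if 'chair' in s:
--         s = 'chair'
--     if 'airplane' in s:
--         s = 'airplane'
--     if 'table' in s:
--         s = 'table'
--     if s in FRUITS:
--         s = 'fruit'
--     if s in ANIMALS:
--         s = 'animal'
--     if 'ship' in s:
--         s = 'ship'
--     return s
--
-- def list_to_classes(objects):
--     return [_classify(s) for s in objects]
-- ===== Notes on version B (the rewrite author's own statement) =====
-- stated objective: simpler
-- what changed: Replaces eight whole-list comprehension passes (each rebuilding the whole list) with a single pass applying one classify helper per element.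
import Mathlib
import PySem

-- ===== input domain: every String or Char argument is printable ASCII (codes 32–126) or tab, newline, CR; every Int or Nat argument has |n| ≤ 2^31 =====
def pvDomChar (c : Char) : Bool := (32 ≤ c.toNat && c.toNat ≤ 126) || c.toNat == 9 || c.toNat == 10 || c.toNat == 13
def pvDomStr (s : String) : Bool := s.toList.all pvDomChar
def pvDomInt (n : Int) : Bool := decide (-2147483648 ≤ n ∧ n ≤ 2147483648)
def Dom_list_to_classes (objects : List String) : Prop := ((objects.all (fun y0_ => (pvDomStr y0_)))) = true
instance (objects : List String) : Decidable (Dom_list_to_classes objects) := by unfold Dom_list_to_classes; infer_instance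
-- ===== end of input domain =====

-- ===== PORT A =====
-- A: eight whole-list comprehension passes. B: one pass with a classify helper; simpler.
def pvFruits : List String := ["apple", "apricot", "peach", "pear", "raspberry", "strawberry", "walnut", "watermelon"]
def pvAnimals : List String := ["bear", "cow", "dog", "elephant", "gorilla", "hedgehog", "lioness", "turtle"]

def list_to_classes (objects : List String) : List String :=
  let objects := objects.map (fun s => if PySem.Str.isIn "face" s then "face" else s)
  let objects := objects.map (fun s => if PySem.Str.isIn "car" s then "car" else s)
  let objects := objects.map (fun s => if PySem.Str.isIn "chair" s then "chair" else s)
  let objects := objects.map (fun s => if PySem.Str.isIn "airplane" s then "airplane" else s)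
  let objects := objects.map (fun s => if PySem.Str.isIn "table" s then "table" else s)
  let objects := objects.map (fun s => if pvFruits.contains s then "fruit" else s)
  let objects := objects.map (fun s => if pvAnimals.contains s then "animal" else s)
  let objects := objects.map (fun s => if PySem.Str.isIn "ship" s then "ship" else s)
  objects

-- ===== PORT B =====
def pvClassify (s : String) : String :=
  let s := if PySem.Str.isIn "face" s then "face" else s
  let s := if PySem.Str.isIn "car" s then "car" else s
  let s := if PySem.Str.isIn "chair" s then "chair" else s
  let s := if PySem.Str.isIn "airplane" s then "airplane" else s
  let s := if PySem.Str.isIn "table" s then "table" else s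
  let s := if pvFruits.contains s then "fruit" else s
  let s := if pvAnimals.contains s then "animal" else s
  let s := if PySem.Str.isIn "ship" s then "ship" else s
  s

def list_to_classes_alt (objects : List String) : List String :=
  objects.map pvClassify

-- ===== PRECONDITION & SPEC =====
def Spec_list_to_classes (objects : List String) (out : List String) : Prop := out = list_to_classes_alt objects
instance (objects : List String) (out : List String) : Decidable (Spec_list_to_classes objects out) := by unfold Spec_list_to_classes; infer_instance

-- ===== CLAIM (what is proved, stated in full; the proofs are below) =====
def Claim_equal_list_to_classes : Prop := ∀ (objects : List String), Dom_list_to_classes objects → Spec_list_to_classes objects (list_to_classes objects)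

-- ===== LEMMAS AND PROOFS =====

-- ===== VERDICT (by name: the statement is the Claim_ definition above) =====
theorem pvA_cons (a : String) (l : List String) :
    list_to_classes (a :: l) = pvClassify a :: list_to_classes l := by
  simp only [list_to_classes, List.map_cons, pvClassify]

theorem pvB_cons (a : String) (l : List String) :
    list_to_classes_alt (a :: l) = pvClassify a :: list_to_classes_alt l := by
  simp only [list_to_classes_alt, List.map_cons]

theorem list_to_classes_spec : Claim_equal_list_to_classes := by
  intro objects hdom
  clear hdom
  show list_to_classes objects = list_to_classes_alt objects
  induction objects with
  | nil => simp only [list_to_classes, list_to_classes_alt, List.map_nil]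
  | cons a l ih => rw [pvA_cons, pvB_cons, ih]
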